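-- pv_equiv track=rewrite | github.com/HuHang-koko5/GraduationDesign | 分析和爬虫部分/graduationProject/graduationProject/parser/seismic_intensity.py | get_close
-- ===== SOURCE A (Python) =====
-- def get_close(index, tag, ftag):
--     i = 1
--     while i+index < len(tag) and index-i >= 0:
--         if tag[i+index] in ftag:
--             return 1
--         elif tag[index-i] in ftag:
--             return 0
--         else:
--             i = i+1
--     if i+index < len(tag):
--         return 1
--     elif index-i >= 0:
--         return 0
--     else:
--         return 0
-- ===== SOURCE B (Python) =====
-- def get_close(index, tag, ftag):
--     n = len(tag)
--     fset = set(ftag)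
--     L = max(0, min(index, n - 1 - index))
--     dr = next((i for i in range(1, L + 1) if tag[index + i] in fset), None)
--     dl = next((i for i in range(1, L + 1) if tag[index - i] in fset), None)
--     if dr is not None and (dl is None or dr <= dl):
--         return 1
--     if dl is not None:
--         return 0
--     return 1 if index + L + 1 < n else 0
-- ===== Notes on version B (the rewrite author's own statement) =====
-- stated objective: alternative
-- what changed: Replaces A's single interleaved symmetric-expansion while loop (checking right then left at each radius) with a precomputed radius bound L, two independent directional scans producing the first right-hit and first left-hit distances, and one final decision step (right wins ties), with a set built once for membership.
import Mathlib
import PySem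

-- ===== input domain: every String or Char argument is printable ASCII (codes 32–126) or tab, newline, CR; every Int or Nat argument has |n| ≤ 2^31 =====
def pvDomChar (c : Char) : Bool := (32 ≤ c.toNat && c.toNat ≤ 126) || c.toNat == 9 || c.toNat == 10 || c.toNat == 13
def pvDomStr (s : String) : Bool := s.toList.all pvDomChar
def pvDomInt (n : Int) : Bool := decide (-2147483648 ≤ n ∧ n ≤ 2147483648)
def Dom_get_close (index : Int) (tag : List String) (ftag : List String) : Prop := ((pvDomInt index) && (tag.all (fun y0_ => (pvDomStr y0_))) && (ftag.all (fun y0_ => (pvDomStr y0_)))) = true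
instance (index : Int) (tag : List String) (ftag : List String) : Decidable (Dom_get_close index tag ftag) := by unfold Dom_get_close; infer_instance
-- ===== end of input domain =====

-- B replaces A's interleaved symmetric expansion with two directional scans over a
-- precomputed radius bound plus one decision step (objective: alternative decomposition).

-- ===== PORT A =====
-- A's while loop, step for step: expand i while both sides are in range, right side
-- checked first; on exhaustion the residual two-branch check (membership ignored).
-- pyGet? is only ever `some` inside the loop (both indices are in range there);
-- `.elim false` is the membership test `tag[...] in ftag`.
def get_close_loop (tag ftag : List String) (index i : Int) : Int :=
  if h : i + index < (tag.length : Int) ∧ index - i ≥ 0 then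
    if (PySem.List.pyGet? tag (i + index)).elim false (fun t => ftag.contains t) then 1
    else if (PySem.List.pyGet? tag (index - i)).elim false (fun t => ftag.contains t) then 0
    else get_close_loop tag ftag index (i + 1)
  else if i + index < (tag.length : Int) then 1
  else if index - i ≥ 0 then 0
  else 0
termination_by ((tag.length : Int) - (i + index)).toNat
decreasing_by omega

def get_close (index : Int) (tag : List String) (ftag : List String) : Int :=
  get_close_loop tag ftag index 1

-- ===== PORT B =====
-- membership test `tag[j] in fset` (indices are always in range where B uses it)
def pvHit (tag : List String) (fset : PySem.Set String) (j : Int) : Bool :=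
  (PySem.List.pyGet? tag j).elim false (fun t => PySem.Set.contains fset t)

def get_close_alt (index : Int) (tag : List String) (ftag : List String) : Int :=
  let n : Int := tag.length
  let fset := PySem.Set.ofList ftag
  let L : Int := max 0 (min index (n - 1 - index))
  let dr := (PySem.List.pyRange 1 (L + 1) 1).find? (fun i => pvHit tag fset (index + i))
  let dl := (PySem.List.pyRange 1 (L + 1) 1).find? (fun i => pvHit tag fset (index - i))
  match dr, dl with
  | some r, some l => if r ≤ l then 1 else 0
  | some _, none => 1
  | none, some _ => 0
  | none, none => if index + L + 1 < n then 1 else 0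

-- ===== PRECONDITION & SPEC =====
def Spec_get_close (index : Int) (tag : List String) (ftag : List String) (out : Int) : Prop := out = get_close_alt index tag ftag
instance (index : Int) (tag : List String) (ftag : List String) (out : Int) : Decidable (Spec_get_close index tag ftag out) := by unfold Spec_get_close; infer_instance

-- ===== CLAIM (what is proved, stated in full; the proofs are below) =====
def Claim_equal_get_close : Prop := ∀ (index : Int) (tag : List String) (ftag : List String), Dom_get_close index tag ftag → Spec_get_close index tag ftag (get_close index tag ftag)

-- ===== LEMMAS AND PROOFS =====

theorem pvhit_eq (tag ftag : List String) (j : Int) :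
    pvHit tag (PySem.Set.ofList ftag) j
      = (PySem.List.pyGet? tag j).elim false (fun t => ftag.contains t) := by
  unfold pvHit
  cases PySem.List.pyGet? tag j with
  | none => rfl
  | some t => simp [PySem.Set.contains_eq_listContains]

theorem find?_range_ge {p : Int → Bool} {a b r : Int}
    (h : (PySem.List.pyRange a b 1).find? p = some r) : a ≤ r := by
  have hm := List.mem_of_find?_eq_some h
  exact (PySem.List.mem_pyRange_one.mp hm).1

-- loop invariant: from any reachable i, A's loop equals B's decision on the
-- still-unscanned suffix [i, L]
theorem loop_eq (tag ftag : List String) (index : Int) (i : Int)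
    (h1 : 1 ≤ i)
    (h2 : i ≤ max 0 (min index ((tag.length : Int) - 1 - index)) + 1) :
    get_close_loop tag ftag index i =
      (match
        (PySem.List.pyRange i (max 0 (min index ((tag.length : Int) - 1 - index)) + 1) 1).find?
          (fun j => pvHit tag (PySem.Set.ofList ftag) (index + j)),
        (PySem.List.pyRange i (max 0 (min index ((tag.length : Int) - 1 - index)) + 1) 1).find?
          (fun j => pvHit tag (PySem.Set.ofList ftag) (index - j)) with
      | some r, some l => if r ≤ l then 1 else 0
      | some _, none => 1
      | none, some _ => 0
      | none, none =>
          if index + max 0 (min index ((tag.length : Int) - 1 - index)) + 1 < (tag.length : Int)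
          then 1 else 0) := by
  set n : Int := (tag.length : Int) with hn
  set Lc : Int := max 0 (min index (n - 1 - index)) with hLc
  by_cases hc : i + index < n ∧ index - i ≥ 0
  · -- loop body runs: i ≤ min index (n-1-index), so i < Lc + 1
    have hiL : i < Lc + 1 := by omega
    rw [PySem.List.pyRange_one_cons hiL]
    rw [get_close_loop]
    rw [dif_pos hc]
    simp only [List.find?_cons]
    rw [pvhit_eq, pvhit_eq]
    have hcomm : index + i = i + index := by ring
    rw [hcomm]
    cases hr : (PySem.List.pyGet? tag (i + index)).elim false (fun t => ftag.contains t) with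
    | true =>
      -- right hit at i: A returns 1; dr = some i, dl (if some l) has l ≥ i
      cases hl : (PySem.List.pyGet? tag (index - i)).elim false (fun t => ftag.contains t) with
      | true => simp
      | false =>
        cases hfl : (PySem.List.pyRange (i + 1) (Lc + 1) 1).find?
            (fun j => pvHit tag (PySem.Set.ofList ftag) (index - j)) with
        | none => simp
        | some l =>
          have hil : i ≤ l := by have := find?_range_ge hfl; omega
          simp [hil]
    | false =>
      cases hl : (PySem.List.pyGet? tag (index - i)).elim false (fun t => ftag.contains t) with
      | true =>
        -- left hit at i: A returns 0; dl = some i, dr (if some r) has r > i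
        cases hfr : (PySem.List.pyRange (i + 1) (Lc + 1) 1).find?
            (fun j => pvHit tag (PySem.Set.ofList ftag) (index + j)) with
        | none => simp
        | some r =>
          have hir : ¬ r ≤ i := by have := find?_range_ge hfr; omega
          simp [hir]
      | false =>
        -- no hit at i: recurse
        simp only [Bool.false_eq_true, if_false]
        have := loop_eq tag ftag index (i + 1) (by omega) (by omega)
        rw [← hn, ← hLc] at this
        exact this
  · -- loop exits: the unscanned range is empty and i = Lc + 1
    have hiGe : Lc + 1 ≤ i := by omega
    have hieq : i = Lc + 1 := by omega
    rw [PySem.List.pyRange_one_eq_nil hiGe]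
    rw [get_close_loop]
    rw [dif_neg hc]
    simp only [List.find?_nil]
    subst hieq
    by_cases hlt : Lc + 1 + index < n
    · rw [if_pos hlt, if_pos (show index + Lc + 1 < n by omega)]
    · rw [if_neg hlt, if_neg (show ¬ index + Lc + 1 < n by omega)]
      split <;> rfl
termination_by (max 0 (min index ((tag.length : Int) - 1 - index)) + 1 - i).toNat
decreasing_by omega

-- ===== VERDICT (by name: the statement is the Claim_ definition above) =====
theorem get_close_spec : Claim_equal_get_close := by
  intro index tag ftag _
  unfold Spec_get_close get_close get_close_alt
  simp only []
  exact loop_eq tag ftag index 1 le_rfl (by omega)
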